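-- pv_equiv track=rewrite | github.com/ErickThoughts/Carbon-resilience | Backups/synthdid-backup 7/synthdid/utils.py | divide_over_frs
-- ===== SOURCE A (Python) =====
-- def divide_over_frs(inputs, feature_meta, raw_len):
--     divide_lst = [ inputs[ -raw_len : ] ]
--     current_len = 0
--
--     for val in feature_meta:
--         fr_len = val[0] * val[1]
--         update_len = current_len + fr_len
--         divide_lst.append( inputs[current_len : update_len] )
--         current_len = update_len
--     return divide_lst
-- ===== SOURCE B (Python) =====
-- def divide_over_frs(inputs, feature_meta, raw_len):
--     frs = [a * b for a, b in feature_meta]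
--     bounds = [sum(frs[:i]) for i in range(len(frs) + 1)]
--     return [inputs[-raw_len:]] + [inputs[s:e] for s, e in zip(bounds, bounds[1:])]
-- ===== Notes on version B (the rewrite author's own statement) =====
-- stated objective: alternative
-- what changed: Replaces the mutable running-offset loop that appends slices one by one with a precomputed prefix-sum boundary table and a comprehension over consecutive boundary pairs.
import Mathlib
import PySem

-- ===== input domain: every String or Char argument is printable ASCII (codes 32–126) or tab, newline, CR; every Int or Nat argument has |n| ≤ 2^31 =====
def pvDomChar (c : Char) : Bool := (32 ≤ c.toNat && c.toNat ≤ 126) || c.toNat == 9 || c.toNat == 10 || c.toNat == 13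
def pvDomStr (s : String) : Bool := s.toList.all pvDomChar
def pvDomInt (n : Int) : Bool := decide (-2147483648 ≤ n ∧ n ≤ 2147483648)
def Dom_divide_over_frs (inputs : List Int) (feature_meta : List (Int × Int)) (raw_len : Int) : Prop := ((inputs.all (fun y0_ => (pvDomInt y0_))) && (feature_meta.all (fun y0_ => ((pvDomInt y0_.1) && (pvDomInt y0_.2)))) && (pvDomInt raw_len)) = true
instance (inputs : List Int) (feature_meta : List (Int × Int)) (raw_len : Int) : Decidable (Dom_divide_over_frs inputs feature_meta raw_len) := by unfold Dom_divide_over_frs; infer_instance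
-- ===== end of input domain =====

-- B replaces A's mutable running-offset append loop with a prefix-sum boundary table and a pass over
-- consecutive boundary pairs (objective: alternative decomposition; same observable behaviour).

-- ===== PORT A =====
def divide_over_frs (inputs : List Int) (feature_meta : List (Int × Int)) (raw_len : Int) : List (List Int) :=
  let divide_lst : List (List Int) := [PySem.List.slice inputs (some (-raw_len)) none]
  let st := feature_meta.foldl
    (fun (st : List (List Int) × Int) val =>
      let fr_len := val.1 * val.2
      let update_len := st.2 + fr_len
      (st.1 ++ [PySem.List.slice inputs (some st.2) (some update_len)], update_len))
    (divide_lst, 0)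
  st.1

-- ===== PORT B =====
def divide_over_frs_alt (inputs : List Int) (feature_meta : List (Int × Int)) (raw_len : Int) : List (List Int) :=
  let frs : List Int := feature_meta.map (fun p => p.1 * p.2)
  let bounds : List Int := (List.range (frs.length + 1)).map (fun i => (frs.take i).sum)
  [PySem.List.slice inputs (some (-raw_len)) none] ++
    (bounds.zip bounds.tail).map (fun p => PySem.List.slice inputs (some p.1) (some p.2))

-- ===== PRECONDITION & SPEC =====
def Spec_divide_over_frs (inputs : List Int) (feature_meta : List (Int × Int)) (raw_len : Int) (out : List (List Int)) : Prop := out = divide_over_frs_alt inputs feature_meta raw_len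
instance (inputs : List Int) (feature_meta : List (Int × Int)) (raw_len : Int) (out : List (List Int)) : Decidable (Spec_divide_over_frs inputs feature_meta raw_len out) := by unfold Spec_divide_over_frs; infer_instance

-- ===== CLAIM (what is proved, stated in full; the proofs are below) =====
def Claim_equal_divide_over_frs : Prop := ∀ (inputs : List Int) (feature_meta : List (Int × Int)) (raw_len : Int), Dom_divide_over_frs inputs feature_meta raw_len → Spec_divide_over_frs inputs feature_meta raw_len (divide_over_frs inputs feature_meta raw_len)

-- ===== LEMMAS AND PROOFS =====

-- the common description of the per-feature slices starting at offset c
def pvSegs (inputs : List Int) (fm : List (Int × Int)) (c : Int) : List (List Int) :=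
  match fm with
  | [] => []
  | v :: rest =>
      PySem.List.slice inputs (some c) (some (c + v.1 * v.2)) :: pvSegs inputs rest (c + v.1 * v.2)

def pvBounds (frs : List Int) : List Int :=
  (List.range (frs.length + 1)).map (fun i => (frs.take i).sum)

lemma pvBounds_cons (f : Int) (frs : List Int) :
    pvBounds (f :: frs) = 0 :: (pvBounds frs).map (fun x => f + x) := by
  simp [pvBounds, List.range_succ_eq_map, List.map_map, Function.comp]

lemma pvBounds_ne_nil (frs : List Int) : pvBounds frs ≠ [] := by
  simp [pvBounds, List.range_succ_eq_map]

lemma pvBounds_head? (frs : List Int) : (pvBounds frs).head? = some 0 := by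
  simp [pvBounds, List.range_succ_eq_map]

lemma pvSegs_eq_pairs (inputs : List Int) (fm : List (Int × Int)) (c : Int) :
    ((pvBounds (fm.map (fun p => p.1 * p.2))).zip (pvBounds (fm.map (fun p => p.1 * p.2))).tail).map
        (fun p => PySem.List.slice inputs (some (c + p.1)) (some (c + p.2)))
      = pvSegs inputs fm c := by
  induction fm generalizing c with
  | nil => simp [pvBounds, pvSegs]
  | cons v rest ih =>
      obtain ⟨b0, bs, hb⟩ :=
        List.exists_cons_of_ne_nil (pvBounds_ne_nil (rest.map (fun p => p.1 * p.2)))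
      have hb0 : b0 = 0 := by
        have h := pvBounds_head? (rest.map (fun p => p.1 * p.2))
        rw [hb] at h; simpa using h
      subst hb0
      simp only [List.map_cons, pvBounds_cons, hb, pvSegs, List.tail_cons,
        List.zip_cons_cons, List.map_cons, add_zero]
      congr 1
      rw [show v.1 * v.2 :: List.map (fun x => v.1 * v.2 + x) bs
            = List.map (fun x => v.1 * v.2 + x) (0 :: bs) from by simp]
      rw [List.zip_map, List.map_map]
      have ihc := ih (c + v.1 * v.2)
      rw [hb] at ihc
      rw [← ihc]
      apply List.map_congr_left
      intro p _
      simp [Prod.map, Function.comp, add_assoc]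

lemma pvFoldA (inputs : List Int) (fm : List (Int × Int)) :
    ∀ (acc : List (List Int)) (c : Int),
      (fm.foldl
        (fun (st : List (List Int) × Int) val =>
          (st.1 ++ [PySem.List.slice inputs (some st.2) (some (st.2 + val.1 * val.2))],
            st.2 + val.1 * val.2))
        (acc, c)).1 = acc ++ pvSegs inputs fm c := by
  induction fm with
  | nil => intro acc c; simp [pvSegs]
  | cons v rest ih =>
      intro acc c
      simp only [List.foldl_cons, pvSegs]
      rw [ih]
      simp

-- ===== VERDICT (by name: the statement is the Claim_ definition above) =====
theorem divide_over_frs_spec : Claim_equal_divide_over_frs := by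
  intro inputs fm raw_len _
  unfold Spec_divide_over_frs divide_over_frs divide_over_frs_alt
  simp only []
  rw [pvFoldA]
  have h := pvSegs_eq_pairs inputs fm 0
  simp only [zero_add] at h
  rw [show ((List.range ((fm.map (fun p => p.1 * p.2)).length + 1)).map
      (fun i => ((fm.map (fun p => p.1 * p.2)).take i).sum))
      = pvBounds (fm.map (fun p => p.1 * p.2)) from rfl]
  rw [h]
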